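-- pv_equiv track=rewrite | github.com/ana-schoffen/Projeto-PIC-2020-2021 | svm-rl-az-tfidf.py | abstracts_features_to_sentences
-- ===== SOURCE A (Python) =====
-- def abstracts_features_to_sentences(abstracts_features, labels):
--     ret = []
--     ret_prev = []
--     ret_next = []
--     ret_labels = []
--     ret_pos = []
--     abstracts_idx = []
--
--     for i, (sentences_labels, features) in enumerate(zip(labels, abstracts_features)):
--         for j, (label, feat_list) in enumerate(zip(sentences_labels, features)):
--             ret.append(feat_list)
--             ret_pos.append(j)
--             ret_labels.append(label)
--             abstracts_idx.append(i)
--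
--             if j - 1 >= 0:
--                 ret_prev.append(features[j - 1])
--             else:
--                 ret_prev.append(['', '', '', '', ''])
--
--             if j + 1 < len(features):
--                 ret_next.append(features[j + 1])
--             else:
--                 ret_next.append(['', '', '', '', ''])
--
--     return ret, ret_prev, ret_next, ret_pos, ret_labels, abstracts_idx
-- ===== SOURCE B (Python) =====
-- def abstracts_features_to_sentences(abstracts_features, labels):
--     blank = ['', '', '', '', '']
--     ret, ret_prev, ret_next = [], [], []
--     ret_pos, ret_labels, abstracts_idx = [], [], []
--
--     for i, (sentences_labels, features) in enumerate(zip(labels, abstracts_features)):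
--         n = min(len(sentences_labels), len(features))
--         ret += features[:n]
--         ret_prev += ([blank] + features[:n - 1])[:n]
--         ret_next += (features[1:n + 1] + [blank])[:n]
--         ret_pos += list(range(n))
--         ret_labels += sentences_labels[:n]
--         abstracts_idx += [i] * n
--
--     return ret, ret_prev, ret_next, ret_pos, ret_labels, abstracts_idx
-- ===== Notes on version B (the rewrite author's own statement) =====
-- stated objective: simpler
-- what changed: The per-sentence inner loop with boundary if/else branches is replaced by per-abstract slice arithmetic: each abstract contributes its six output blocks at once (features[:n], a blank-padded shifted copy for prev, a shifted-and-padded copy for next, range(n), labels[:n], [i]*n).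
import Mathlib
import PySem

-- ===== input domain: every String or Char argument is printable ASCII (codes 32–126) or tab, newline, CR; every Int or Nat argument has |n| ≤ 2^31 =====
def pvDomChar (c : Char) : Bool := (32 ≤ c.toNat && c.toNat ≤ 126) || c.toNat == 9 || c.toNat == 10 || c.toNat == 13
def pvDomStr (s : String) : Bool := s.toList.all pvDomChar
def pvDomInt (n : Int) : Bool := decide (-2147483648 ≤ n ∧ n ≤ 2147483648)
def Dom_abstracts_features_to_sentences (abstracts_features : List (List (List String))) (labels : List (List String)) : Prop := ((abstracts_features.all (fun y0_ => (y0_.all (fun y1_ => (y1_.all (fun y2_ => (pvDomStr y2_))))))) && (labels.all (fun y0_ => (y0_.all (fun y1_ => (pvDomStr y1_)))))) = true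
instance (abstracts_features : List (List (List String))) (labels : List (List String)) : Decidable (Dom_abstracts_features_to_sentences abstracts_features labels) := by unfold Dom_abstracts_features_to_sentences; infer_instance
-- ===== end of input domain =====

-- B replaces A's per-sentence inner loop with boundary branches by per-abstract slice
-- arithmetic (shifted copies of `features` padded with a blank); objective: simpler.

def pvBlank : List String := ["", "", "", "", ""]

-- ===== PORT A =====
-- inner loop: for j,(label,feat_list) in enumerate(zip(sentences_labels, features))
def pvInnerA (i : Nat) (features : List (List String)) :
    Nat → List (String × List String) →
    List (List String) × List (List String) × List (List String) × List Int × List String × List Int →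
    List (List String) × List (List String) × List (List String) × List Int × List String × List Int
  | _, [], st => st
  | j, (label, feat) :: rest, (ret, rp, rn, rpos, rlab, aidx) =>
      pvInnerA i features (j+1) rest
        (ret ++ [feat],
         rp ++ [if 1 ≤ j then features.getD (j-1) [] else pvBlank],   -- features[j-1], in range since j ≥ 1
         rn ++ [if j + 1 < features.length then features.getD (j+1) [] else pvBlank],  -- features[j+1], in range
         rpos ++ [(j : Int)],
         rlab ++ [label],
         aidx ++ [(i : Int)])

-- outer loop: for i,(sentences_labels, features) in enumerate(zip(labels, abstracts_features))
def pvOuterA :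
    Nat → List (List String × List (List String)) →
    List (List String) × List (List String) × List (List String) × List Int × List String × List Int →
    List (List String) × List (List String) × List (List String) × List Int × List String × List Int
  | _, [], st => st
  | i, (sl, features) :: rest, st =>
      pvOuterA (i+1) rest (pvInnerA i features 0 (sl.zip features) st)

def abstracts_features_to_sentences (abstracts_features : List (List (List String))) (labels : List (List String)) : List (List String) × List (List String) × List (List String) × List Int × List String × List Int :=
  pvOuterA 0 (labels.zip abstracts_features) ([], [], [], [], [], [])

-- ===== PORT B =====
-- each abstract contributes six slice-built blocks at once (slices have nonnegative
-- bounds here, so Python's fs[:n], fs[1:n+1] are exactly take/drop)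
def pvOuterB :
    Nat → List (List String × List (List String)) →
    List (List String) × List (List String) × List (List String) × List Int × List String × List Int →
    List (List String) × List (List String) × List (List String) × List Int × List String × List Int
  | _, [], st => st
  | i, (ls, fs) :: rest, (ret, rp, rn, rpos, rlab, aidx) =>
      let n := min ls.length fs.length
      pvOuterB (i+1) rest
        (ret ++ fs.take n,
         rp ++ (pvBlank :: fs.take (n-1)).take n,
         rn ++ ((fs.drop 1).take n ++ [pvBlank]).take n,
         rpos ++ (List.range n).map Int.ofNat,
         rlab ++ ls.take n,
         aidx ++ List.replicate n (i : Int))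

def abstracts_features_to_sentences_alt (abstracts_features : List (List (List String))) (labels : List (List String)) : List (List String) × List (List String) × List (List String) × List Int × List String × List Int :=
  pvOuterB 0 (labels.zip abstracts_features) ([], [], [], [], [], [])

-- ===== PRECONDITION & SPEC =====
def Spec_abstracts_features_to_sentences (abstracts_features : List (List (List String))) (labels : List (List String)) (out : List (List String) × List (List String) × List (List String) × List Int × List String × List Int) : Prop := out = abstracts_features_to_sentences_alt abstracts_features labels
instance (abstracts_features : List (List (List String))) (labels : List (List String)) (out : List (List String) × List (List String) × List (List String) × List Int × List String × List Int) : Decidable (Spec_abstracts_features_to_sentences abstracts_features labels out) := by unfold Spec_abstracts_features_to_sentences; infer_instance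

-- ===== CLAIM (what is proved, stated in full; the proofs are below) =====
def Claim_equal_abstracts_features_to_sentences : Prop := ∀ (abstracts_features : List (List (List String))) (labels : List (List String)), Dom_abstracts_features_to_sentences abstracts_features labels → Spec_abstracts_features_to_sentences abstracts_features labels (abstracts_features_to_sentences abstracts_features labels)

-- ===== LEMMAS AND PROOFS =====

-- the six lists A's inner loop appends for one abstract, built front-to-back
def pvBatch (i : Nat) (fs : List (List String)) :
    Nat → List (String × List String) →
    List (List String) × List (List String) × List (List String) × List Int × List String × List Int
  | _, [] => ([], [], [], [], [], [])
  | j, (label, feat) :: rest =>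
      let b := pvBatch i fs (j+1) rest
      (feat :: b.1,
       (if 1 ≤ j then fs.getD (j-1) [] else pvBlank) :: b.2.1,
       (if j + 1 < fs.length then fs.getD (j+1) [] else pvBlank) :: b.2.2.1,
       (j : Int) :: b.2.2.2.1,
       label :: b.2.2.2.2.1,
       (i : Int) :: b.2.2.2.2.2)

theorem pvInnerA_eq_batch (i : Nat) (fs : List (List String)) :
    ∀ (pairs : List (String × List String)) (j : Nat)
      (st : List (List String) × List (List String) × List (List String) × List Int × List String × List Int),
      pvInnerA i fs j pairs st =
        (st.1 ++ (pvBatch i fs j pairs).1,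
         st.2.1 ++ (pvBatch i fs j pairs).2.1,
         st.2.2.1 ++ (pvBatch i fs j pairs).2.2.1,
         st.2.2.2.1 ++ (pvBatch i fs j pairs).2.2.2.1,
         st.2.2.2.2.1 ++ (pvBatch i fs j pairs).2.2.2.2.1,
         st.2.2.2.2.2 ++ (pvBatch i fs j pairs).2.2.2.2.2) := by
  intro pairs
  induction pairs with
  | nil => intro j st; obtain ⟨a, b, c, d, e, f⟩ := st; simp [pvInnerA, pvBatch]
  | cons p rest ih =>
      intro j st
      obtain ⟨p1, p2⟩ := p
      obtain ⟨a, b, c, d, e, f⟩ := st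
      simp [pvInnerA, pvBatch, ih]

theorem pvBatch_ret (i : Nat) (fs : List (List String)) :
    ∀ (pairs : List (String × List String)) (j : Nat),
      (pvBatch i fs j pairs).1 = pairs.map Prod.snd := by
  intro pairs; induction pairs with
  | nil => intro j; simp [pvBatch]
  | cons p rest ih => intro j; obtain ⟨p1, p2⟩ := p; simp [pvBatch, ih]

theorem pvBatch_lab (i : Nat) (fs : List (List String)) :
    ∀ (pairs : List (String × List String)) (j : Nat),
      (pvBatch i fs j pairs).2.2.2.2.1 = pairs.map Prod.fst := by
  intro pairs; induction pairs with
  | nil => intro j; simp [pvBatch]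
  | cons p rest ih => intro j; obtain ⟨p1, p2⟩ := p; simp [pvBatch, ih]

theorem pvBatch_idx (i : Nat) (fs : List (List String)) :
    ∀ (pairs : List (String × List String)) (j : Nat),
      (pvBatch i fs j pairs).2.2.2.2.2 = List.replicate pairs.length (i : Int) := by
  intro pairs; induction pairs with
  | nil => intro j; simp [pvBatch]
  | cons p rest ih => intro j; obtain ⟨p1, p2⟩ := p; simp [pvBatch, ih, List.replicate_succ]

theorem pvBatch_pos (i : Nat) (fs : List (List String)) :
    ∀ (pairs : List (String × List String)) (j : Nat),
      (pvBatch i fs j pairs).2.2.2.1 =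
        (List.range pairs.length).map (fun k => ((j + k : Nat) : Int)) := by
  intro pairs; induction pairs with
  | nil => intro j; simp [pvBatch]
  | cons p rest ih =>
      intro j; obtain ⟨p1, p2⟩ := p
      simp [pvBatch, ih, List.range_succ_eq_map, List.map_map, Function.comp]
      intro a _; omega

theorem pvBatch_prev (i : Nat) (fs : List (List String)) :
    ∀ (pairs : List (String × List String)) (j : Nat),
      (pvBatch i fs j pairs).2.1 =
        (List.range pairs.length).map
          (fun k => if 1 ≤ j + k then fs.getD (j + k - 1) [] else pvBlank) := by
  intro pairs; induction pairs with
  | nil => intro j; simp [pvBatch]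
  | cons p rest ih =>
      intro j; obtain ⟨p1, p2⟩ := p
      rw [List.length_cons, List.range_succ_eq_map, List.map_cons, List.map_map]
      simp only [pvBatch, ih]
      congr 1
      apply List.map_congr_left; intro k _
      have h2 : j + 1 + k = j + (k + 1) := by omega
      simp only [Function.comp_apply, h2]

theorem pvBatch_next (i : Nat) (fs : List (List String)) :
    ∀ (pairs : List (String × List String)) (j : Nat),
      (pvBatch i fs j pairs).2.2.1 =
        (List.range pairs.length).map
          (fun k => if j + k + 1 < fs.length then fs.getD (j + k + 1) [] else pvBlank) := by
  intro pairs; induction pairs with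
  | nil => intro j; simp [pvBatch]
  | cons p rest ih =>
      intro j; obtain ⟨p1, p2⟩ := p
      rw [List.length_cons, List.range_succ_eq_map, List.map_cons, List.map_map]
      simp only [pvBatch, ih]
      congr 1
      apply List.map_congr_left; intro k _
      have h2 : j + 1 + k = j + (k + 1) := by omega
      simp only [Function.comp_apply, h2]

theorem map_snd_zip_eq_take {α β : Type} :
    ∀ (l1 : List α) (l2 : List β), (l1.zip l2).map Prod.snd = l2.take (min l1.length l2.length) := by
  intro l1; induction l1 with
  | nil => intro l2; simp
  | cons a t ih =>
      intro l2; cases l2 with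
      | nil => simp
      | cons b t2 => simp [ih, Nat.succ_min_succ]

theorem map_fst_zip_eq_take {α β : Type} :
    ∀ (l1 : List α) (l2 : List β), (l1.zip l2).map Prod.fst = l1.take (min l1.length l2.length) := by
  intro l1; induction l1 with
  | nil => intro l2; simp
  | cons a t ih =>
      intro l2; cases l2 with
      | nil => simp
      | cons b t2 => simp [ih, Nat.succ_min_succ]

theorem prev_slice (fs : List (List String)) (n : Nat) (hn : n ≤ fs.length) :
    (List.range n).map (fun k => if 1 ≤ k then fs.getD (k - 1) [] else pvBlank) =
      (pvBlank :: fs.take (n - 1)).take n := by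
  apply List.ext_getElem
  · simp; omega
  · intro k h1 h2
    simp only [List.getElem_map, List.getElem_range, List.getElem_take]
    rcases k with _ | k
    · simp
    · have hk : k + 1 < n := by simpa using h1
      simp only [List.getElem_cons_succ, List.getElem_take]
      have : k < fs.length := by omega
      simp [List.getD_eq_getElem?_getD, List.getElem?_eq_getElem this]

theorem next_slice (fs : List (List String)) (n : Nat) (hn : n ≤ fs.length) :
    (List.range n).map (fun k => if k + 1 < fs.length then fs.getD (k + 1) [] else pvBlank) =
      ((fs.drop 1).take n ++ [pvBlank]).take n := by
  apply List.ext_getElem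
  · simp; omega
  · intro k h1 h2
    have hk : k < n := by simpa using h1
    simp only [List.getElem_map, List.getElem_range, List.getElem_take]
    by_cases h : k + 1 < fs.length
    · have hlt : k < ((fs.drop 1).take n).length := by simp; omega
      rw [List.getElem_append_left hlt]
      simp only [List.getElem_take, List.getElem_drop]
      simp [h, List.getD_eq_getElem?_getD, Nat.add_comm 1 k]
    · have hge : ((fs.drop 1).take n).length ≤ k := by simp; omega
      rw [List.getElem_append_right hge]
      simp [h]

theorem pvOuter_eq :
    ∀ (l : List (List String × List (List String))) (i : Nat)
      (st : List (List String) × List (List String) × List (List String) × List Int × List String × List Int),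
      pvOuterA i l st = pvOuterB i l st := by
  intro l; induction l with
  | nil => intro i st; rfl
  | cons p rest ih =>
      intro i st
      obtain ⟨ls, fs⟩ := p
      obtain ⟨a, b, c, d, e, f⟩ := st
      have hz : (ls.zip fs).length = min ls.length fs.length := by simp
      have hn : min ls.length fs.length ≤ fs.length := Nat.min_le_right _ _
      simp only [pvOuterA, pvOuterB, pvInnerA_eq_batch, ih]
      congr 1
      rw [pvBatch_ret, pvBatch_prev, pvBatch_next, pvBatch_pos, pvBatch_lab, pvBatch_idx,
          map_snd_zip_eq_take, map_fst_zip_eq_take, hz]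
      simp only [Nat.zero_add]
      rw [prev_slice fs _ hn, next_slice fs _ hn]
      simp [Int.ofNat_eq_natCast]

-- ===== VERDICT (by name: the statement is the Claim_ definition above) =====
theorem abstracts_features_to_sentences_spec : Claim_equal_abstracts_features_to_sentences := by
  intro af labels _
  show _ = _
  unfold abstracts_features_to_sentences abstracts_features_to_sentences_alt
  exact pvOuter_eq _ 0 _
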